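-- pv_equiv track=rewrite | github.com/Nanorivs/parcial1 | paquete/matrices.py | busqueda_lineal_matriz
-- ===== SOURCE A (Python) =====
-- def busqueda_lineal_matriz(matriz : list, valor : any) -> list:
--     """
--     Realiza una busqueda sobre una matriz de forma lineal
--
--     Parametros:
--     matriz: representa el conjunto de datos sobre el cual se va a realizar la busqueda
--     valor: valor del cual se desea saber su indice
--
--     Retorno:
--     Retorna None si el valor no se encuentra o una lista con los indices del elemento
--     encontrado
--     """
--     retorno = None
--     for i in range(len(matriz)):
--         for j in range(len(matriz[i])):
--             if matriz[i][j] == valor: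
--                 retorno = [i,j]
--                 break
--     return retorno
-- ===== SOURCE B (Python) =====
-- def busqueda_lineal_matriz(matriz : list, valor : any) -> list:
--     for i in reversed(range(len(matriz))):
--         fila = matriz[i]
--         for j in range(len(fila)):
--             if fila[j] == valor:
--                 return [i, j]
--     return None
-- ===== Notes on version B (the rewrite author's own statement) =====
-- stated objective: alternative
-- what changed: B walks rows in reverse and returns early on the first matching row instead of scanning the whole matrix while overwriting a result variable; both yield the last row containing the value with its first matching column.
import Mathlib
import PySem

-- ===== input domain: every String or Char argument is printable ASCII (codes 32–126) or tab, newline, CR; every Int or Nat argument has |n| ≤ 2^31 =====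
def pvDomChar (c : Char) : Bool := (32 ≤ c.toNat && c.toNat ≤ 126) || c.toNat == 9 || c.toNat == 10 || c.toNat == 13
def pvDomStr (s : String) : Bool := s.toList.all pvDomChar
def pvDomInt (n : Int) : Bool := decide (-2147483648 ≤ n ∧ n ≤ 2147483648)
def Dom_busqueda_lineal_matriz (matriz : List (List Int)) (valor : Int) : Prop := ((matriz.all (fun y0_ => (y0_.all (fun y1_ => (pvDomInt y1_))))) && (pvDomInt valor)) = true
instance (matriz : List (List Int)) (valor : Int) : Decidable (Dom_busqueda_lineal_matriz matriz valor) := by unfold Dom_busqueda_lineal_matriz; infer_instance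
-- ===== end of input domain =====

-- B scans rows in reverse and returns early on the first matching row, instead of A's
-- full scan that keeps overwriting 'retorno'; same return value (last matching row,
-- first matching column in it). Objective: alternative decomposition, same cost.

-- ===== PORT A =====
-- inner loop of A: 'for j in range(len(fila)): if fila[j] == valor: break' — first matching index
def pvRowScanA (fila : List Int) (valor : Int) (j : Int) : Option Int :=
  match fila with
  | [] => none
  | x :: xs => if x = valor then some j else pvRowScanA xs valor (j + 1)

def busqueda_lineal_matriz (matriz : List (List Int)) (valor : Int) : Option (List Int) :=
  (PySem.List.enumerate matriz 0).foldl
    (fun retorno p =>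
      match pvRowScanA p.2 valor 0 with
      | some j => some [p.1, j]
      | none => retorno)
    none

-- ===== PORT B =====
-- inner loop of B: left-to-right scan of one row, first matching index
def pvRowScanB (fila : List Int) (valor : Int) (j : Int) : Option Int :=
  match fila with
  | [] => none
  | x :: xs => if x = valor then some j else pvRowScanB xs valor (j + 1)

-- outer loop of B: rows in reverse, early return on first row with a match
def pvAltGo (filas : List (Int × List Int)) (valor : Int) : Option (List Int) :=
  match filas with
  | [] => none
  | p :: rest =>
    match pvRowScanB p.2 valor 0 with
    | some j => some [p.1, j]
    | none => pvAltGo rest valor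

def busqueda_lineal_matriz_alt (matriz : List (List Int)) (valor : Int) : Option (List Int) :=
  pvAltGo (PySem.List.enumerate matriz 0).reverse valor

-- ===== PRECONDITION & SPEC =====
def Spec_busqueda_lineal_matriz (matriz : List (List Int)) (valor : Int) (out : Option (List Int)) : Prop := out = busqueda_lineal_matriz_alt matriz valor
instance (matriz : List (List Int)) (valor : Int) (out : Option (List Int)) : Decidable (Spec_busqueda_lineal_matriz matriz valor out) := by unfold Spec_busqueda_lineal_matriz; infer_instance

-- ===== CLAIM (what is proved, stated in full; the proofs are below) =====
def Claim_equal_busqueda_lineal_matriz : Prop := ∀ (matriz : List (List Int)) (valor : Int), Dom_busqueda_lineal_matriz matriz valor → Spec_busqueda_lineal_matriz matriz valor (busqueda_lineal_matriz matriz valor)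

-- ===== LEMMAS AND PROOFS =====

theorem pvRowScan_eq (fila : List Int) (valor j : Int) :
    pvRowScanA fila valor j = pvRowScanB fila valor j := by
  induction fila generalizing j with
  | nil => rfl
  | cons x xs ih => simp [pvRowScanA, pvRowScanB, ih]

theorem pvAltGo_append (xs ys : List (Int × List Int)) (valor : Int) :
    pvAltGo (xs ++ ys) valor =
      (match pvAltGo xs valor with
       | some r => some r
       | none => pvAltGo ys valor) := by
  induction xs with
  | nil => rfl
  | cons p t ih =>
    simp only [List.cons_append, pvAltGo, ih]
    cases pvRowScanB p.2 valor 0 <;> rfl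

theorem pvFoldl_eq (l : List (Int × List Int)) (valor : Int) (acc : Option (List Int)) :
    l.foldl
      (fun retorno p =>
        match pvRowScanA p.2 valor 0 with
        | some j => some [p.1, j]
        | none => retorno)
      acc =
      (match pvAltGo l.reverse valor with
       | some r => some r
       | none => acc) := by
  induction l generalizing acc with
  | nil => rfl
  | cons p t ih =>
    rw [List.foldl_cons, ih]
    simp only [List.reverse_cons, pvAltGo_append, pvRowScan_eq]
    cases pvAltGo t.reverse valor <;> cases h : pvRowScanB p.2 valor 0 <;>
      simp [pvAltGo, h]

-- ===== VERDICT (by name: the statement is the Claim_ definition above) =====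
theorem busqueda_lineal_matriz_spec : Claim_equal_busqueda_lineal_matriz := by
  intro matriz valor _
  unfold Spec_busqueda_lineal_matriz busqueda_lineal_matriz busqueda_lineal_matriz_alt
  rw [pvFoldl_eq]
  cases pvAltGo (PySem.List.enumerate matriz 0).reverse valor <;> rfl
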